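-- pv_equiv track=rewrite | github.com/NicoGG011/Heuristicas | Tarea1/Ejercicio3.py | MaxTip
-- ===== SOURCE A (Python) =====
-- def MaxTip(lista):
--     candidates = lista
--     s = []
--     t = 0
--     for _ in range(len(lista)):
--
--         while candidates is not None:
--             m = max(candidates)
--             break
--         if t > m:
--             continue
--         else:
--             s.append(m - t)
--         t += 1
--         candidates.remove(m)
--     return sum(s)
-- ===== SOURCE B (Python) =====
-- def MaxTip(lista):
--     total = 0
--     for i, v in enumerate(sorted(lista, reverse=True)):
--         if v < i:
--             break
--         total += v - i
--     return total
-- ===== Notes on version B (the rewrite author's own statement) =====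
-- stated objective: faster
-- what changed: B sorts the list descending once and sums (v - rank) until a value drops below its rank, instead of A's loop that rescans for max() and list.remove() each iteration; B also does not mutate the input list.
import Mathlib
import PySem

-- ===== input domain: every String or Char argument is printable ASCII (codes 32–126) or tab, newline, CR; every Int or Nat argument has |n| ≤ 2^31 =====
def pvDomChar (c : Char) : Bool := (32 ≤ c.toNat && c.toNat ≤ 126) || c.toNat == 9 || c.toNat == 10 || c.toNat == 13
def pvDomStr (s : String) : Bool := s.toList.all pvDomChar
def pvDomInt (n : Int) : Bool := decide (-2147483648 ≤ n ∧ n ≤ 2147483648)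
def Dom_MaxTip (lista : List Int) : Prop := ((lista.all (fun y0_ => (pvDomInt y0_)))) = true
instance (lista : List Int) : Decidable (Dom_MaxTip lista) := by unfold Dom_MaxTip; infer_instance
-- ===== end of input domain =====

-- B sorts once (descending) and accumulates (v - rank) until v < rank, replacing A's
-- repeated max+remove scans (O(n log n) vs O(n^2)). A mutates its argument in place
-- (list.remove); B does not — the equivalence proved here is about the RETURN value only.


-- ===== PORT A =====
-- one iteration of A's for-body; state = (candidates, s, t).
-- the 'none' branch of max? is unreachable (candidates only empties after the last
-- iteration), so returning the state unchanged there is exact.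
def MaxTipStep (st : List Int × List Int × Int) : List Int × List Int × Int :=
  match st with
  | (candidates, s, t) =>
    match PySem.List.max? candidates (fun x => x) with
    | none => (candidates, s, t)
    | some m =>
      if t > m then (candidates, s, t)   -- 'continue'
      else
        ((PySem.List.remove? candidates m).getD candidates, s ++ [m - t], t + 1)

def MaxTip (lista : List Int) : Int :=
  ((PySem.List.pyRange 0 lista.length 1).foldl (fun st _ => MaxTipStep st)
    (lista, ([] : List Int), (0 : Int))).2.1.sum

-- ===== PORT B =====
-- B's for-with-break over enumerate(sorted(lista, reverse=True))
def MaxTipGo : Int → List Int → Int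
  | _, [] => 0
  | i, v :: rest => if v < i then 0 else (v - i) + MaxTipGo (i + 1) rest

def MaxTip_alt (lista : List Int) : Int :=
  MaxTipGo 0 (PySem.List.sorted lista (fun x => x) true)

-- ===== PRECONDITION & SPEC =====
def Spec_MaxTip (lista : List Int) (out : Int) : Prop := out = MaxTip_alt lista
instance (lista : List Int) (out : Int) : Decidable (Spec_MaxTip lista out) := by unfold Spec_MaxTip; infer_instance

-- ===== CLAIM (what is proved, stated in full; the proofs are below) =====
def Claim_equal_MaxTip : Prop := ∀ (lista : List Int), Dom_MaxTip lista → Spec_MaxTip lista (MaxTip lista)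

-- ===== LEMMAS AND PROOFS =====

-- a foldl whose step ignores the element is iteration of the step
theorem foldl_const_iterate {α β : Type} (f : β → β) (l : List α) (st : β) :
    l.foldl (fun st _ => f st) st = f^[l.length] st := by
  induction l generalizing st with
  | nil => rfl
  | cons x xs ih => simp [List.foldl_cons, ih, Function.iterate_succ_apply]

-- pulling the maximum to the front of sorted-descending
theorem sorted_rev_eq_max_cons (cs : List Int) (m : Int)
    (hm : PySem.List.max? cs (fun x => x) = some m) :
    PySem.List.sorted cs (fun x => x) true = m :: PySem.List.sorted (cs.erase m) (fun x => x) true := by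
  have hmem : m ∈ cs := PySem.List.max?_mem hm
  have hmax : ∀ y ∈ cs, y ≤ m := by
    intro y hy; exact PySem.List.max?_isMax hm y hy
  have hperm1 : (PySem.List.sorted cs (fun x => x) true).Perm cs := PySem.List.sorted_perm ..
  have hperm2 : (m :: PySem.List.sorted (cs.erase m) (fun x => x) true).Perm cs := by
    refine List.Perm.trans (List.Perm.cons m (PySem.List.sorted_perm ..)) ?_
    exact (List.perm_cons_erase hmem).symm
  have hs1 : List.Pairwise (fun a b => b ≤ a) (PySem.List.sorted cs (fun x => x) true) := by
    simpa using PySem.List.sorted_pairwise_rev (xs := cs) (key := fun x => x)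
  have hs2 : List.Pairwise (fun a b : Int => b ≤ a)
      (m :: PySem.List.sorted (cs.erase m) (fun x => x) true) := by
    refine List.pairwise_cons.mpr ⟨?_, ?_⟩
    · intro y hy
      have : y ∈ cs.erase m := (PySem.List.mem_sorted ..).1 hy
      exact hmax y (List.mem_of_mem_erase this)
    · simpa using PySem.List.sorted_pairwise_rev (xs := cs.erase m) (key := fun x => x)
  exact (hperm1.trans hperm2.symm).eq_of_pairwise (fun a b _ _ h1 h2 => le_antisymm h2 h1) hs1 hs2

-- the loop invariant: iterating A's step cs.length times from (cs, s, t) accumulates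
-- exactly B's sum over the descending sort of cs starting at rank t
theorem iterate_step_eq (n : Nat) : ∀ (cs s : List Int) (t : Int), cs.length = n →
    (MaxTipStep^[n] (cs, s, t)).2.1.sum = s.sum + MaxTipGo t (PySem.List.sorted cs (fun x => x) true) := by
  induction n with
  | zero =>
    intro cs s t hlen
    have hcs : cs = [] := List.length_eq_zero_iff.mp hlen
    subst hcs
    simp [MaxTipGo, PySem.List.sorted]
  | succ k ih =>
    intro cs s t hlen
    have hne : cs ≠ [] := by intro h; subst h; simp at hlen
    obtain ⟨m, hm⟩ : ∃ m, PySem.List.max? cs (fun x => x) = some m := by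
      cases hmax : PySem.List.max? cs (fun x => x) with
      | none => exact absurd ((PySem.List.max?_eq_none_iff _ _).mp hmax) hne
      | some m => exact ⟨m, rfl⟩
    have hmem : m ∈ cs := PySem.List.max?_mem hm
    have hsort := sorted_rev_eq_max_cons cs m hm
    by_cases ht : t > m
    · -- 'continue' forever: the step fixes the state
      have hfix : MaxTipStep (cs, s, t) = (cs, s, t) := by
        simp [MaxTipStep, hm, ht]
      rw [Function.iterate_fixed hfix]
      rw [hsort]
      have : m < t := ht
      simp [MaxTipGo, this]
    · have hle : ¬ (t > m) := ht
      have hrem : PySem.List.remove? cs m = some (cs.erase m) :=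
        PySem.List.remove?_eq_some_erase cs m hmem
      have hstep : MaxTipStep (cs, s, t) = (cs.erase m, s ++ [m - t], t + 1) := by
        simp [MaxTipStep, hm, hle, hrem]
      rw [Function.iterate_succ_apply, hstep,
        ih (cs.erase m) (s ++ [m - t]) (t + 1) (by
          have := List.length_erase_of_mem hmem
          omega)]
      rw [hsort]
      have hnlt : ¬ (m < t) := by omega
      simp [MaxTipGo, hnlt]
      ring

-- ===== VERDICT (by name: the statement is the Claim_ definition above) =====
theorem MaxTip_spec : Claim_equal_MaxTip := by
  intro lista _
  unfold Spec_MaxTip MaxTip MaxTip_alt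
  rw [foldl_const_iterate, PySem.List.length_pyRange_one]
  have := iterate_step_eq lista.length lista [] 0 rfl
  simpa using this
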